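-- pv_equiv track=rewrite | github.com/ganbaroff/volaura | packages/swarm/archive/skill_applier.py | _apply_add_trigger
-- ===== SOURCE A (Python) =====
-- def _find_section_end(lines: list[str], section_header: str) -> int:
--     """Find the line index after the end of a markdown ## section.
--
--     Returns the index of the blank line / next header after section_header.
--     Returns -1 if section not found.
--     """
--     in_section = False
--     for i, line in enumerate(lines):
--         if line.strip().lower() == section_header.lower():
--             in_section = True
--             continue
--         if in_section and line.startswith("## "):
--             return i   # next section starts here — insert before it
--     if in_section:
--         return len(lines)  # end of file
--     return -1
--
-- def _find_section_start(lines: list[str], section_header: str) -> int: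
--     """Find the line index of a ## section header. -1 if not found."""
--     for i, line in enumerate(lines):
--         if line.strip().lower() == section_header.lower():
--             return i
--     return -1
--
-- def _apply_add_trigger(lines: list[str], improvement: str) -> list[str]:
--     """Create ## Trigger section if missing."""
--     if _find_section_start(lines, "## Trigger") != -1:
--         # Already exists — treat as add_example in Trigger
--         end = _find_section_end(lines, "## Trigger")
--         return lines[:end] + [f"- {improvement}", ""] + lines[end:]
--
--     # Find position after title (first # line)
--     insert_after = 0
--     for i, line in enumerate(lines):
--         if line.startswith("# "):
--             insert_after = i + 1
--             break
--
--     new_section = [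
--         "",
--         "## Trigger",
--         f"- {improvement}",
--         "",
--     ]
--     return lines[:insert_after] + new_section + lines[insert_after:]
-- ===== SOURCE B (Python) =====
-- def _apply_add_trigger(lines: list[str], improvement: str) -> list[str]:
--     """Create ## Trigger section if missing (single pass over lines)."""
--     trigger_start = None
--     trigger_end = None
--     title_idx = None
--     for i, line in enumerate(lines):
--         is_hdr = line.strip().lower() == "## trigger"
--         if trigger_start is None and is_hdr:
--             trigger_start = i
--         elif trigger_start is not None and trigger_end is None and not is_hdr and line.startswith("## "):
--             trigger_end = i
--         if title_idx is None and line.startswith("# "):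
--             title_idx = i + 1
--     if trigger_start is not None:
--         end = trigger_end if trigger_end is not None else len(lines)
--         return lines[:end] + [f"- {improvement}", ""] + lines[end:]
--     pos = title_idx if title_idx is not None else 0
--     return lines[:pos] + ["", "## Trigger", f"- {improvement}", ""] + lines[pos:]
-- ===== Notes on version B (the rewrite author's own statement) =====
-- stated objective: simpler
-- what changed: A's two helper functions plus a third loop (up to three separate scans of the list) are replaced by one single pass over enumerate(lines) that tracks the three first-match indices (trigger_start, trigger_end, title_idx) in an accumulator, followed by one splice.
import Mathlib
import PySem

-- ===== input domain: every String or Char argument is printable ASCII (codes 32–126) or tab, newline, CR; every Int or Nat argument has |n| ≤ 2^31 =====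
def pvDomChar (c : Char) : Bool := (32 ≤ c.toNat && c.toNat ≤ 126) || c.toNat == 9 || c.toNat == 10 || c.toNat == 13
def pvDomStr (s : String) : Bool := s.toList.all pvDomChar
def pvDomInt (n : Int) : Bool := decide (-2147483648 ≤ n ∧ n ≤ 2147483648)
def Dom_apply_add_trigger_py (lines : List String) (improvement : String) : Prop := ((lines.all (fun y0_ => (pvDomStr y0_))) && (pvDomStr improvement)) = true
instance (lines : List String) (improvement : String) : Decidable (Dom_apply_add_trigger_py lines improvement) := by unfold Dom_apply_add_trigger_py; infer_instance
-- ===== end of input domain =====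

-- B replaces A's two helper scans plus a third loop by ONE pass over enumerate(lines)
-- that tracks the three first-match indices (objective: simpler — one traversal, no helpers).

-- ===== PORT A =====
-- _find_section_start, as an index-carrying recursion over the list
def pvFindStart (lines : List String) (hdr : String) (i : Int) : Int :=
  match lines with
  | [] => -1
  | line :: rest =>
    if PySem.Str.lower (PySem.Str.strip line) == PySem.Str.lower hdr then i
    else pvFindStart rest hdr (i + 1)

-- _find_section_end (i counts from the caller's 0, so the [] case's i is len(lines))
def pvFindEnd (lines : List String) (hdr : String) (i : Int) (inSec : Bool) : Int :=
  match lines with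
  | [] => if inSec then i else -1
  | line :: rest =>
    if PySem.Str.lower (PySem.Str.strip line) == PySem.Str.lower hdr then
      pvFindEnd rest hdr (i + 1) true
    else if inSec && PySem.Str.startswith line "## " then i
    else pvFindEnd rest hdr (i + 1) inSec

-- the 'insert_after' loop of _apply_add_trigger (break at the first '# ' line, default 0)
def pvTitlePos (lines : List String) (i : Int) : Int :=
  match lines with
  | [] => 0
  | line :: rest =>
    if PySem.Str.startswith line "# " then i + 1 else pvTitlePos rest (i + 1)

def apply_add_trigger_py (lines : List String) (improvement : String) : List String :=
  if pvFindStart lines "## Trigger" 0 ≠ -1 then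
    let e := pvFindEnd lines "## Trigger" 0 false
    PySem.List.slice lines none (some e) ++ ["- " ++ improvement, ""] ++ PySem.List.slice lines (some e) none
  else
    let ins := pvTitlePos lines 0
    PySem.List.slice lines none (some ins) ++ ["", "## Trigger", "- " ++ improvement, ""] ++ PySem.List.slice lines (some ins) none

-- ===== PORT B =====
-- one step of B's single loop body: state = (trigger_start, trigger_end, title_idx)
def pvScanStep (acc : Option Int × Option Int × Option Int) (p : Int × String) : Option Int × Option Int × Option Int :=
  let isHdr := PySem.Str.lower (PySem.Str.strip p.2) == "## trigger"
  let tste :=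
    if acc.1.isNone && isHdr then (some p.1, acc.2.1)
    else if acc.1.isSome && acc.2.1.isNone && !isHdr && PySem.Str.startswith p.2 "## " then (acc.1, some p.1)
    else (acc.1, acc.2.1)
  (tste.1, tste.2,
    if acc.2.2.isNone && PySem.Str.startswith p.2 "# " then some (p.1 + 1) else acc.2.2)

def apply_add_trigger_py_alt (lines : List String) (improvement : String) : List String :=
  let st := (PySem.List.enumerate lines 0).foldl pvScanStep (none, none, none)
  match st.1 with
  | some _ =>
    let e := st.2.1.getD (PySem.List.len lines)
    PySem.List.slice lines none (some e) ++ ["- " ++ improvement, ""] ++ PySem.List.slice lines (some e) none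
  | none =>
    let pos := st.2.2.getD 0
    PySem.List.slice lines none (some pos) ++ ["", "## Trigger", "- " ++ improvement, ""] ++ PySem.List.slice lines (some pos) none

-- ===== PRECONDITION & SPEC =====
def Spec_apply_add_trigger_py (lines : List String) (improvement : String) (out : List String) : Prop := out = apply_add_trigger_py_alt lines improvement
instance (lines : List String) (improvement : String) (out : List String) : Decidable (Spec_apply_add_trigger_py lines improvement out) := by unfold Spec_apply_add_trigger_py; infer_instance

-- ===== CLAIM (what is proved, stated in full; the proofs are below) =====
def Claim_equal_apply_add_trigger_py : Prop := ∀ (lines : List String) (improvement : String), Dom_apply_add_trigger_py lines improvement → Spec_apply_add_trigger_py lines improvement (apply_add_trigger_py lines improvement)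

-- ===== LEMMAS AND PROOFS =====

theorem pv_hdr : PySem.Str.lower "## Trigger" = "## trigger" := by decide

theorem pv_triple (t : Option Int × Option Int × Option Int) : t = (t.1, t.2.1, t.2.2) := rfl

theorem pv_len_cons (x : String) (xs : List String) (i : Int) :
    i + 1 + (xs.length : Int) = i + ((x :: xs).length : Int) := by
  simp [List.length_cons]; ring

-- a set title_idx never changes
theorem pv_ti_some (lines : List String) (i v : Int) (ts te : Option Int) :
    ((PySem.List.enumerate lines i).foldl pvScanStep (ts, te, some v)).2.2 = some v := by
  induction lines generalizing i ts te with
  | nil => simp [PySem.List.enumerate_nil]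
  | cons x xs ih =>
    rw [PySem.List.enumerate_cons, List.foldl_cons]
    obtain ⟨a, b, c, hs⟩ : ∃ a b c, pvScanStep (ts, te, some v) (i, x) = (a, b, c) := ⟨_, _, _, rfl⟩
    have hc : c = some v := by
      have := congrArg (fun t => t.2.2) hs; simpa [pvScanStep] using this.symm
    rw [hs, hc]; exact ih _ _ _

-- the fold's third component matches A's insert_after loop
theorem pv_ti_none (lines : List String) (i : Int) (ts te : Option Int) :
    (((PySem.List.enumerate lines i).foldl pvScanStep (ts, te, none)).2.2).getD 0 = pvTitlePos lines i := by
  induction lines generalizing i ts te with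
  | nil => simp [PySem.List.enumerate_nil, pvTitlePos]
  | cons x xs ih =>
    rw [PySem.List.enumerate_cons, List.foldl_cons,
        pv_triple (pvScanStep (ts, te, none) (i, x))]
    simp only [pvTitlePos]
    by_cases ht : PySem.Chars.startswith x.toList ['#', ' '] = true
    · have h3 : (pvScanStep (ts, te, none) (i, x)).2.2 = some (i + 1) := by
        simp [pvScanStep, ht]
      rw [h3, pv_ti_some, if_pos (by simp [ht])]
      rfl
    · have h3 : (pvScanStep (ts, te, none) (i, x)).2.2 = none := by
        simp [pvScanStep, ht]
      rw [h3, ih, if_neg (by simp [ht])]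

-- once both trigger indices are set they never change
theorem pv_done (lines : List String) (i k m : Int) (ti : Option Int) :
    ((PySem.List.enumerate lines i).foldl pvScanStep (some k, some m, ti)).1 = some k ∧
    ((PySem.List.enumerate lines i).foldl pvScanStep (some k, some m, ti)).2.1 = some m := by
  induction lines generalizing i ti with
  | nil => simp [PySem.List.enumerate_nil]
  | cons x xs ih =>
    rw [PySem.List.enumerate_cons, List.foldl_cons,
        pv_triple (pvScanStep (some k, some m, ti) (i, x))]
    have h1 : (pvScanStep (some k, some m, ti) (i, x)).1 = some k := by simp [pvScanStep]
    have h2 : (pvScanStep (some k, some m, ti) (i, x)).2.1 = some m := by simp [pvScanStep]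
    rw [h1, h2]; exact ih _ _

-- with trigger_start already found and trigger_end pending, the fold computes A's section end
theorem pv_insec (lines : List String) (i k : Int) (ti : Option Int) :
    ((PySem.List.enumerate lines i).foldl pvScanStep (some k, none, ti)).1 = some k ∧
    pvFindEnd lines "## Trigger" i true =
      ((PySem.List.enumerate lines i).foldl pvScanStep (some k, none, ti)).2.1.getD (i + lines.length) := by
  induction lines generalizing i ti with
  | nil => simp [PySem.List.enumerate_nil, pvFindEnd]
  | cons x xs ih =>
    rw [PySem.List.enumerate_cons, List.foldl_cons,
        pv_triple (pvScanStep (some k, none, ti) (i, x))]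
    simp only [pvFindEnd, pv_hdr]
    by_cases H : PySem.Str.lower (PySem.Str.strip x) = "## trigger"
    · have h1 : (pvScanStep (some k, none, ti) (i, x)).1 = some k := by simp [pvScanStep, H]
      have h2 : (pvScanStep (some k, none, ti) (i, x)).2.1 = none := by simp [pvScanStep, H]
      rw [h1, h2, if_pos (by simp [H])]
      refine ⟨(ih _ _).1, ?_⟩
      rw [(ih (i + 1) _).2, pv_len_cons]
    · by_cases hsw : PySem.Chars.startswith x.toList ['#', '#', ' '] = true
      · have h1 : (pvScanStep (some k, none, ti) (i, x)).1 = some k := by simp [pvScanStep, H, hsw]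
        have h2 : (pvScanStep (some k, none, ti) (i, x)).2.1 = some i := by simp [pvScanStep, H, hsw]
        rw [h1, h2, if_neg (by simp [H]), if_pos (by simp [hsw])]
        refine ⟨(pv_done _ _ _ _ _).1, ?_⟩
        rw [(pv_done _ _ _ _ _).2]
        rfl
      · have h1 : (pvScanStep (some k, none, ti) (i, x)).1 = some k := by simp [pvScanStep, H, hsw]
        have h2 : (pvScanStep (some k, none, ti) (i, x)).2.1 = none := by simp [pvScanStep, H, hsw]
        rw [h1, h2, if_neg (by simp [H]), if_neg (by simp [hsw])]
        refine ⟨(ih _ _).1, ?_⟩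
        rw [(ih (i + 1) _).2, pv_len_cons]

-- from the empty trigger state, the fold's first two components match A's two helpers
theorem pv_none (lines : List String) (i : Int) (hi : 0 ≤ i) (ti : Option Int) :
    (((PySem.List.enumerate lines i).foldl pvScanStep (none, none, ti)).1 = none ↔
      pvFindStart lines "## Trigger" i = -1) ∧
    (((PySem.List.enumerate lines i).foldl pvScanStep (none, none, ti)).1 ≠ none →
      pvFindEnd lines "## Trigger" i false =
        ((PySem.List.enumerate lines i).foldl pvScanStep (none, none, ti)).2.1.getD (i + lines.length)) := by
  induction lines generalizing i ti with
  | nil => simp [PySem.List.enumerate_nil, pvFindStart]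
  | cons x xs ih =>
    rw [PySem.List.enumerate_cons, List.foldl_cons,
        pv_triple (pvScanStep (none, none, ti) (i, x))]
    simp only [pvFindStart, pvFindEnd, pv_hdr]
    by_cases H : PySem.Str.lower (PySem.Str.strip x) = "## trigger"
    · have h1 : (pvScanStep (none, none, ti) (i, x)).1 = some i := by simp [pvScanStep, H]
      have h2 : (pvScanStep (none, none, ti) (i, x)).2.1 = none := by simp [pvScanStep, H]
      rw [h1, h2, if_pos (by simp [H]), if_pos (by simp [H])]
      constructor
      · rw [(pv_insec _ _ _ _).1]
        constructor
        · intro h; exact absurd h (by simp)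
        · intro h; omega
      · intro _
        rw [(pv_insec xs (i + 1) i _).2, pv_len_cons]
    · have h1 : (pvScanStep (none, none, ti) (i, x)).1 = none := by simp [pvScanStep, H]
      have h2 : (pvScanStep (none, none, ti) (i, x)).2.1 = none := by simp [pvScanStep, H]
      rw [h1, h2, if_neg (by simp [H]), if_neg (by simp [H]), if_neg (by simp)]
      have ihh := ih (i + 1) (by omega) ((pvScanStep (none, none, ti) (i, x)).2.2)
      refine ⟨ihh.1, ?_⟩
      intro h
      rw [ihh.2 h, pv_len_cons]

-- ===== VERDICT (by name: the statement is the Claim_ definition above) =====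
theorem apply_add_trigger_py_spec : Claim_equal_apply_add_trigger_py := by
  intro lines improvement _
  unfold Spec_apply_add_trigger_py
  have hmain := pv_none lines 0 (by norm_num) none
  have hti := pv_ti_none lines 0 none none
  simp only [apply_add_trigger_py, apply_add_trigger_py_alt]
  cases hr : ((PySem.List.enumerate lines 0).foldl pvScanStep (none, none, none)).1 with
  | none =>
    have hfs : pvFindStart lines "## Trigger" 0 = -1 := hmain.1.mp hr
    rw [← hti]
    simp [hfs]
  | some k =>
    have hne : pvFindStart lines "## Trigger" 0 ≠ -1 := by
      intro h
      exact absurd (hmain.1.mpr h) (by simp [hr])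
    have hend := hmain.2 (by simp [hr])
    rw [hend]
    simp [hne, PySem.List.len_eq]
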